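-- pv_equiv track=rewrite | github.com/leslieshen1/ardi-skill | coordinator/src/coordinator/awp_distribution.py | distribute_to_holders
-- ===== SOURCE A (Python) =====
-- def distribute_to_holders(
--     awp_to_holders: int,
--     holder_powers: dict[str, int],
-- ) -> dict[str, int]:
--     """Power-weighted AWP distribution. Same shape + rounding policy as the
--     $aArdi distribution in `settlement.compute_day` so a single Merkle leaf
--     with both amounts is consistent across both streams.
--     """
--     if not holder_powers or awp_to_holders == 0:
--         return {}
--     total_power = sum(holder_powers.values())
--     if total_power == 0:
--         return {}
--
--     addresses = sorted(holder_powers.keys(), key=lambda a: a.lower())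
--     out: dict[str, int] = {}
--     cumulative = 0
--     for i, addr in enumerate(addresses):
--         if i == len(addresses) - 1:
--             amt = awp_to_holders - cumulative
--         else:
--             amt = (awp_to_holders * holder_powers[addr]) // total_power
--             cumulative += amt
--         if amt > 0:
--             out[addr] = amt
--     return out
-- ===== SOURCE B (Python) =====
-- def distribute_to_holders(
--     awp_to_holders: int,
--     holder_powers: dict[str, int],
-- ) -> dict[str, int]:
--     if not holder_powers or awp_to_holders == 0:
--         return {}
--     total_power = sum(holder_powers.values())
--     if total_power == 0:
--         return {}
--     items = sorted(holder_powers.items(), key=lambda kv: kv[0].lower())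
--
--     def settle(pairs, budget):
--         # Divide and conquer: every holder except the globally last one gets its
--         # proportional floor share; the last absorbs whatever budget remains.
--         if len(pairs) == 1:
--             return [(pairs[0][0], budget)]
--         mid = len(pairs) // 2
--         head = [(a, (awp_to_holders * p) // total_power) for a, p in pairs[:mid]]
--         return head + settle(pairs[mid:], budget - sum(amt for _, amt in head))
--
--     return {a: v for a, v in settle(items, awp_to_holders) if v > 0}
-- ===== Notes on version B (the rewrite author's own statement) =====
-- stated objective: alternative
-- what changed: Replaces A's indexed single pass with a running cumulative and an is-last-index test by a divide-and-conquer recursion over the sorted items: split in half, give the left half its floor shares, recurse on the right half with the remaining budget; the singleton base case absorbs the budget, and positives are filtered once at the end.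
import Mathlib
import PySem

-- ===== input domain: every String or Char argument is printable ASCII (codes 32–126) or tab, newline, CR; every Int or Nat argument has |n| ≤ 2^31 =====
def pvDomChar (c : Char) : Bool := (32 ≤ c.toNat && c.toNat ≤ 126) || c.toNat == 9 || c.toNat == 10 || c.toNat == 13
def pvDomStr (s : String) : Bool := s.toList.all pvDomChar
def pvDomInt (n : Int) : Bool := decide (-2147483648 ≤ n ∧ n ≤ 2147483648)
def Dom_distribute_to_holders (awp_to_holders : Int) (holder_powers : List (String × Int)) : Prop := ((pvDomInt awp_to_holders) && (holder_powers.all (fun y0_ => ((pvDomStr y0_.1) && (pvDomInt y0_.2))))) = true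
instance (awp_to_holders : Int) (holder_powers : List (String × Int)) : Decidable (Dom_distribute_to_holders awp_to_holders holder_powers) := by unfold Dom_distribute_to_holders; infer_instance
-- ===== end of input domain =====

-- B replaces A's indexed single pass (running cumulative + is-last-index test) by a
-- divide-and-conquer recursion over the sorted items (objective: alternative; same cost).

-- ===== PORT A =====
-- holder_powers[addr] is ported as first-match lookup with default 0; addr is always a key
-- of holder_powers (it comes from sorted(holder_powers.keys())), so the default is unreachable.
def distribute_to_holders (awp_to_holders : Int) (holder_powers : List (String × Int)) : List (String × Int) :=
  if holder_powers = [] ∨ awp_to_holders = 0 then [] else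
  let total_power := (holder_powers.map Prod.snd).sum
  if total_power = 0 then [] else
  let addresses := PySem.List.sorted (holder_powers.map Prod.fst) (fun a => PySem.Str.lower a) false
  let n : Int := addresses.length
  let res := (PySem.List.enumerate addresses 0).foldl
    (fun (st : PySem.Dict String Int × Int) p =>
      if p.1 = n - 1 then
        let amt := awp_to_holders - st.2
        (if amt > 0 then st.1.insert p.2 amt else st.1, st.2)
      else
        let amt := PySem.Int.floordiv (awp_to_holders * ((holder_powers.lookup p.2).getD 0)) total_power
        (if amt > 0 then st.1.insert p.2 amt else st.1, st.2 + amt))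
    (PySem.Dict.empty, 0)
  res.1.items

-- ===== PORT B =====
-- Source B's inner `settle(pairs, budget)`: divide and conquer on the sorted items.
-- Python indexes pairs[0] under `len(pairs) == 1`; settle is never called on [], so the
-- [] branch (returning []) is unreachable.
def settleB (awp total : Int) : List (String × Int) → Int → List (String × Int)
  | [], _ => []
  | [kv], budget => [(kv.1, budget)]
  | kv1 :: kv2 :: rest, budget =>
    let pairs := kv1 :: kv2 :: rest
    let mid := pairs.length / 2
    let head := (pairs.take mid).map (fun kv => (kv.1, PySem.Int.floordiv (awp * kv.2) total))
    head ++ settleB awp total (pairs.drop mid) (budget - (head.map Prod.snd).sum)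
termination_by l _ => l.length
decreasing_by simp; omega

-- The final dict comprehension has distinct keys (the addresses are the distinct keys of the
-- dict), so it is ported as List.filter preserving order.
def distribute_to_holders_alt (awp_to_holders : Int) (holder_powers : List (String × Int)) : List (String × Int) :=
  if holder_powers = [] ∨ awp_to_holders = 0 then [] else
  let total_power := (holder_powers.map Prod.snd).sum
  if total_power = 0 then [] else
  let items := PySem.List.sorted holder_powers (fun kv => PySem.Str.lower kv.1) false
  (settleB awp_to_holders total_power items awp_to_holders).filter (fun p => decide (p.2 > 0))

-- ===== PRECONDITION & SPEC =====
-- Pre_ excludes association lists with duplicate keys: such a list does not represent a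
-- Python dict (the declared type of holder_powers), so A never receives it.
def Pre_distribute_to_holders (awp_to_holders : Int) (holder_powers : List (String × Int)) : Prop :=
  (holder_powers.map Prod.fst).Nodup
instance (awp_to_holders : Int) (holder_powers : List (String × Int)) : Decidable (Pre_distribute_to_holders awp_to_holders holder_powers) := by unfold Pre_distribute_to_holders; infer_instance

def pvWitness_distribute_to_holders : Int × (List (String × Int)) := (10, [("Bob", 3), ("alice", 2)])

def Spec_distribute_to_holders (awp_to_holders : Int) (holder_powers : List (String × Int)) (out : List (String × Int)) : Prop := out = distribute_to_holders_alt awp_to_holders holder_powers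
instance (awp_to_holders : Int) (holder_powers : List (String × Int)) (out : List (String × Int)) : Decidable (Spec_distribute_to_holders awp_to_holders holder_powers out) := by unfold Spec_distribute_to_holders; infer_instance

-- ===== CLAIM (what is proved, stated in full; the proofs are below) =====
def Claim_equal_distribute_to_holders : Prop := ∀ (awp_to_holders : Int) (holder_powers : List (String × Int)), Dom_distribute_to_holders awp_to_holders holder_powers → Pre_distribute_to_holders awp_to_holders holder_powers → Spec_distribute_to_holders awp_to_holders holder_powers (distribute_to_holders awp_to_holders holder_powers)

-- ===== LEMMAS AND PROOFS =====

-- A's loop, rewritten structurally: the "last index" test becomes "tail is empty".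
def goA (f : String → Int) (awp : Int) : PySem.Dict String Int → Int → List String → PySem.Dict String Int
  | d, _, [] => d
  | d, c, a :: l =>
    if l.isEmpty then (if awp - c > 0 then d.insert a (awp - c) else d)
    else goA f awp (if f a > 0 then d.insert a (f a) else d) (c + f a) l

-- The common meeting point: per-address floor shares, the last address absorbing the budget.
def specL (f : String → Int) : List String → Int → List (String × Int)
  | [], _ => []
  | [a], b => [(a, b)]
  | a :: a' :: l, b => (a, f a) :: specL f (a' :: l) (b - f a)

-- specP: the same shape on (address, power) pairs, with the floor computed from the power.
def specP (awp total : Int) : List (String × Int) → Int → List (String × Int)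
  | [], _ => []
  | [kv], b => [(kv.1, b)]
  | kv :: kv' :: l, b =>
    (kv.1, PySem.Int.floordiv (awp * kv.2) total)
      :: specP awp total (kv' :: l) (b - PySem.Int.floordiv (awp * kv.2) total)

theorem foldA_eq_goA (f : String → Int) (awp : Int) (n : Int)
    (l : List String) (s : Int) (d : PySem.Dict String Int) (c : Int)
    (h : s + l.length = n) :
    ((PySem.List.enumerate l s).foldl
      (fun (st : PySem.Dict String Int × Int) p =>
        if p.1 = n - 1 then
          (if awp - st.2 > 0 then st.1.insert p.2 (awp - st.2) else st.1, st.2)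
        else
          (if f p.2 > 0 then st.1.insert p.2 (f p.2) else st.1, st.2 + f p.2))
      (d, c)).1 = goA f awp d c l := by
  induction l generalizing s d c with
  | nil => simp [PySem.List.enumerate_nil, goA]
  | cons a l ih =>
    rw [PySem.List.enumerate_cons]
    simp only [List.foldl_cons, goA]
    by_cases hl : l = []
    · subst hl
      have hs : s = n - 1 := by simp at h; omega
      simp [hs, PySem.List.enumerate_nil]
    · have hl0 : 0 < l.length := List.length_pos_of_ne_nil hl
      have hs : ¬ (s = n - 1) := by simp at h; omega
      simp only [hs, List.isEmpty_iff, hl, if_false]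
      exact ih (s + 1) _ _ (by simp at h ⊢; omega)

theorem goA_eq_specL (f : String → Int) (awp : Int)
    (l : List String) (d : PySem.Dict String Int) (c : Int)
    (hne : l ≠ []) (hnd : l.Nodup) (hdisj : ∀ a ∈ l, d.contains a = false) :
    (goA f awp d c l).items
      = d.items ++ (specL f l (awp - c)).filter (fun p => decide (p.2 > 0)) := by
  induction l generalizing d c with
  | nil => exact absurd rfl hne
  | cons a l ih =>
    have hac : d.contains a = false := hdisj a (by simp)
    cases l with
    | nil =>
      simp only [goA, List.isEmpty_nil, if_true, specL, List.filter_cons, List.filter_nil]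
      by_cases hpos : awp - c > 0
      · rw [if_pos hpos, PySem.Dict.items_insert_of_not_contains _ _ hac]
        simp
        omega
      · rw [if_neg hpos]
        simp
        omega
    | cons b l' =>
      rw [show goA f awp d c (a :: b :: l')
            = goA f awp (if f a > 0 then d.insert a (f a) else d) (c + f a) (b :: l') from rfl]
      have hstep : (goA f awp (if f a > 0 then d.insert a (f a) else d) (c + f a) (b :: l')).items
          = (if f a > 0 then d.insert a (f a) else d).items
            ++ (specL f (b :: l') (awp - (c + f a))).filter (fun p => decide (p.2 > 0)) := by
        apply ih
        · simp
        · exact hnd.of_cons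
        · intro x hx
          by_cases hfa : f a > 0
          · simp only [hfa, if_true]
            have hxa : x ≠ a := by
              rintro rfl; exact (List.nodup_cons.mp hnd).1 hx
            rw [PySem.Dict.contains_insert]
            simp [hxa, hdisj x (by simp [hx])]
          · simp only [hfa, if_false]
            exact hdisj x (by simp [hx])
      rw [hstep]
      have harith : awp - (c + f a) = awp - c - f a := by ring
      rw [harith]
      simp only [specL, List.filter_cons]
      by_cases hfa : f a > 0
      · rw [if_pos hfa, PySem.Dict.items_insert_of_not_contains _ _ hac]
        simp [hfa]
      · rw [if_neg hfa]
        simp [hfa]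

theorem specP_cons (awp total : Int) (kv : String × Int) (l : List (String × Int)) (b : Int)
    (h : l ≠ []) :
    specP awp total (kv :: l) b
      = (kv.1, PySem.Int.floordiv (awp * kv.2) total)
          :: specP awp total l (b - PySem.Int.floordiv (awp * kv.2) total) := by
  cases l with
  | nil => exact absurd rfl h
  | cons kv' l' => rfl

theorem specP_append (awp total : Int) (l₁ l₂ : List (String × Int)) (b : Int) (h : l₂ ≠ []) :
    specP awp total (l₁ ++ l₂) b
      = l₁.map (fun kv => (kv.1, PySem.Int.floordiv (awp * kv.2) total))
          ++ specP awp total l₂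
              (b - (l₁.map (fun kv => PySem.Int.floordiv (awp * kv.2) total)).sum) := by
  induction l₁ generalizing b with
  | nil => simp
  | cons kv l₁ ih =>
    have hne : l₁ ++ l₂ ≠ [] := by simp [h]
    rw [List.cons_append, specP_cons awp total kv (l₁ ++ l₂) b hne, ih]
    simp only [List.map_cons, List.sum_cons, List.cons_append]
    have harith : b - PySem.Int.floordiv (awp * kv.2) total
          - (l₁.map (fun kv => PySem.Int.floordiv (awp * kv.2) total)).sum
        = b - (PySem.Int.floordiv (awp * kv.2) total
          + (l₁.map (fun kv => PySem.Int.floordiv (awp * kv.2) total)).sum) := by ring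
    rw [harith]

theorem settleB_eq_specP (awp total : Int) (n : Nat) :
    ∀ (pairs : List (String × Int)) (b : Int), pairs.length ≤ n →
      settleB awp total pairs b = specP awp total pairs b := by
  induction n with
  | zero =>
    intro pairs b h
    have hpn : pairs = [] := List.eq_nil_of_length_eq_zero (Nat.le_zero.mp h)
    subst hpn
    simp [settleB, specP]
  | succ n ih =>
    intro pairs b h
    match pairs with
    | [] => simp [settleB, specP]
    | [kv] => simp [settleB, specP]
    | kv1 :: kv2 :: rest =>
      rw [settleB]
      set pl := kv1 :: kv2 :: rest with hpl
      set mid := pl.length / 2 with hmid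
      have hmid1 : 1 ≤ mid := by simp [hmid, hpl]; omega
      have hmidlt : mid < pl.length := by simp [hmid, hpl]; omega
      have hdropne : pl.drop mid ≠ [] := by
        intro hc
        have := List.length_drop (l := pl) (i := mid)
        rw [hc] at this
        simp at this
        omega
      have hsplit : pl = pl.take mid ++ pl.drop mid := (List.take_append_drop mid pl).symm
      have hrec : settleB awp total (pl.drop mid)
            (b - (((pl.take mid).map (fun kv => (kv.1, PySem.Int.floordiv (awp * kv.2) total))).map Prod.snd).sum)
          = specP awp total (pl.drop mid)
            (b - (((pl.take mid).map (fun kv => (kv.1, PySem.Int.floordiv (awp * kv.2) total))).map Prod.snd).sum) := by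
        apply ih
        have := List.length_drop (l := pl) (i := mid)
        omega
      rw [hrec]
      conv_rhs => rw [hsplit]
      rw [specP_append awp total _ _ b hdropne]
      simp [List.map_map, Function.comp_def]

theorem specP_eq_specL (awp total : Int) (f : String → Int) :
    ∀ (sp : List (String × Int)) (b : Int),
      (∀ kv ∈ sp, f kv.1 = PySem.Int.floordiv (awp * kv.2) total) →
      specP awp total sp b = specL f (sp.map Prod.fst) b := by
  intro sp
  induction sp with
  | nil => intro b _; rfl
  | cons kv l ih =>
    intro b hf
    cases l with
    | nil => simp [specP, specL]
    | cons kv' l' =>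
      have hfa : f kv.1 = PySem.Int.floordiv (awp * kv.2) total := hf kv (by simp)
      simp only [specP, List.map_cons, specL, hfa]
      exact congrArg _ (ih _ (fun x hx => hf x (by simp [hx])))

theorem map_fst_insertBy (kv : String × Int) (ys : List (String × Int)) :
    (PySem.List.insertBy (fun a b : String × Int => decide (PySem.Str.lower a.1 < PySem.Str.lower b.1)) kv ys).map Prod.fst
      = PySem.List.insertBy (fun a b : String => decide (PySem.Str.lower a < PySem.Str.lower b)) kv.1 (ys.map Prod.fst) := by
  induction ys with
  | nil => rfl
  | cons y ys ih =>
    simp only [List.map_cons, PySem.List.insertBy]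
    split
    · rfl
    · rw [List.map_cons, ih]

theorem map_fst_foldl_insertBy (l : List (String × Int)) :
    ∀ (acc : List (String × Int)),
    (l.foldl (fun acc kv => PySem.List.insertBy (fun a b : String × Int => decide (PySem.Str.lower a.1 < PySem.Str.lower b.1)) kv acc) acc).map Prod.fst
      = (l.map Prod.fst).foldl (fun acc a => PySem.List.insertBy (fun a b : String => decide (PySem.Str.lower a < PySem.Str.lower b)) a acc) (acc.map Prod.fst) := by
  induction l with
  | nil => intro acc; rfl
  | cons kv l ih =>
    intro acc
    simp only [List.map_cons, List.foldl_cons]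
    rw [ih, map_fst_insertBy]

theorem map_fst_sorted (hp : List (String × Int)) :
    (PySem.List.sorted hp (fun kv => PySem.Str.lower kv.1) false).map Prod.fst
      = PySem.List.sorted (hp.map Prod.fst) (fun a => PySem.Str.lower a) false := by
  rw [PySem.List.sorted_eq_foldl_insertBy, PySem.List.sorted_eq_foldl_insertBy]
  exact map_fst_foldl_insertBy hp []

theorem lookup_of_mem_nodup (hp : List (String × Int)) (kv : String × Int)
    (hmem : kv ∈ hp) (hnd : (hp.map Prod.fst).Nodup) : hp.lookup kv.1 = some kv.2 := by
  induction hp with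
  | nil => simp at hmem
  | cons y l ih =>
    simp only [List.map_cons, List.nodup_cons] at hnd
    rcases List.mem_cons.mp hmem with h | h
    · subst h; simp [List.lookup]
    · have hne : kv.1 ≠ y.1 := by
        intro hc
        exact hnd.1 (hc ▸ List.mem_map_of_mem h)
      have hbe : (kv.1 == y.1) = false := by simpa using hne
      simp only [List.lookup, hbe]
      exact ih h hnd.2

theorem distribute_to_holders_spec_aux (awp_to_holders : Int) (holder_powers : List (String × Int))
    (hnd : (holder_powers.map Prod.fst).Nodup) :
    distribute_to_holders awp_to_holders holder_powers
      = distribute_to_holders_alt awp_to_holders holder_powers := by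
  unfold distribute_to_holders distribute_to_holders_alt
  by_cases h1 : holder_powers = [] ∨ awp_to_holders = 0
  · simp [h1]
  · simp only [h1, if_false]
    set total := (holder_powers.map Prod.snd).sum with htot
    by_cases h2 : total = 0
    · simp [h2]
    · simp only [h2, if_false]
      set addresses := PySem.List.sorted (holder_powers.map Prod.fst) (fun a => PySem.Str.lower a) false with haddr
      set items := PySem.List.sorted holder_powers (fun kv => PySem.Str.lower kv.1) false with hitems
      set f : String → Int := fun a =>
        PySem.Int.floordiv (awp_to_holders * ((holder_powers.lookup a).getD 0)) total with hf
      have hpne : holder_powers ≠ [] := by tauto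
      have hane : addresses ≠ [] := by
        rw [haddr, Ne, PySem.List.sorted_eq_nil_iff]
        simp [hpne]
      have hand : addresses.Nodup :=
        ((PySem.List.sorted_perm (holder_powers.map Prod.fst) (fun a => PySem.Str.lower a) false)).nodup_iff.mpr hnd
      -- A side
      have hfold := foldA_eq_goA f awp_to_holders (addresses.length) addresses 0
        PySem.Dict.empty 0 (by simp)
      have hgo := goA_eq_specL f awp_to_holders addresses PySem.Dict.empty 0 hane hand
        (by intro a _; rfl)
      have hA : ((PySem.List.enumerate addresses 0).foldl
          (fun (st : PySem.Dict String Int × Int) p =>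
            if p.1 = (addresses.length : Int) - 1 then
              let amt := awp_to_holders - st.2
              (if amt > 0 then st.1.insert p.2 amt else st.1, st.2)
            else
              let amt := f p.2
              (if amt > 0 then st.1.insert p.2 amt else st.1, st.2 + amt))
          (PySem.Dict.empty, 0)).1.items
          = (specL f addresses (awp_to_holders - 0)).filter (fun p => decide (p.2 > 0)) := by
        rw [hfold, hgo]; rfl
      rw [hA]
      -- B side
      have hB : settleB awp_to_holders total items awp_to_holders
          = specL f (items.map Prod.fst) awp_to_holders := by
        rw [settleB_eq_specP awp_to_holders total items.length items awp_to_holders (le_refl _)]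
        apply specP_eq_specL
        intro kv hkv
        have hmem : kv ∈ holder_powers :=
          (PySem.List.mem_sorted holder_powers (fun kv => PySem.Str.lower kv.1) false kv).mp hkv
        have hlk : List.lookup kv.1 holder_powers = some kv.2 :=
          lookup_of_mem_nodup holder_powers kv hmem hnd
        simp [hf, hlk]
      rw [hB]
      have hmap : items.map Prod.fst = addresses := by
        rw [hitems, haddr]; exact map_fst_sorted holder_powers
      rw [hmap, show awp_to_holders - 0 = awp_to_holders from by ring]

-- ===== VERDICT (by name: the statement is the Claim_ definition above) =====
theorem distribute_to_holders_spec : Claim_equal_distribute_to_holders := by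
  intro awp hp _ hpre
  exact distribute_to_holders_spec_aux awp hp hpre
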